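-- pv_equiv track=rewrite | github.com/atrawog/oauth-https-proxy | scripts/rebuild_justfile.py | categorize_recipes
-- ===== SOURCE A (Python) =====
-- from collections import defaultdict
--
-- def categorize_recipes(recipes):
--     """Categorize recipes by their prefix."""
--     categories = defaultdict(list)
--
--     for name, content in recipes:
--         # Add description comment if missing
--         lines = content.split('\n')
--         first_line = lines[0]
--
--         # Determine category
--         if name.startswith('cert-'):
--             category = 'CERTIFICATE MANAGEMENT'
--             if name == 'cert-create':
--                 lines[0] = first_line.split(':')[0] + ':  # Create a new certificate'
--             elif name == 'cert-delete':
--                 lines[0] = first_line.split(':')[0] + ':  # Delete certificate'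
--             elif name == 'cert-list':
--                 lines[0] = first_line.split(':')[0] + ':  # List certificates (requires authentication)'
--             elif name == 'cert-show':
--                 lines[0] = first_line.split(':')[0] + ':  # Show certificate details'
--         elif name.startswith('config-'):
--             category = 'CONFIGURATION MANAGEMENT'
--             if name == 'config-save':
--                 lines[0] = first_line.split(':')[0] + ':  # Save full configuration to YAML backup'
--             elif name == 'config-load':
--                 lines[0] = first_line.split(':')[0] + ':  # Load configuration from YAML backup'
--         elif name.startswith('service-port'):
--             category = 'PORT MANAGEMENT'
--         elif name.startswith('service-') and any(x in name for x in ['external', 'register', 'unregister', 'update-external', 'list-all']):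
--             category = 'EXTERNAL SERVICE MANAGEMENT'
--         elif name.startswith('service-'):
--             category = 'DOCKER SERVICE MANAGEMENT'
--         elif name.startswith('logs'):
--             category = 'LOGGING AND MONITORING'
--         elif name.startswith('oauth-'):
--             category = 'OAUTH MANAGEMENT'
--         elif name.startswith('proxy-resource'):
--             category = 'PROTECTED RESOURCE MANAGEMENT'
--         elif name.startswith('proxy-'):
--             category = 'PROXY MANAGEMENT'
--         elif name.startswith('route-'):
--             category = 'ROUTE MANAGEMENT'
--         elif name.startswith('token-'):
--             category = 'TOKEN MANAGEMENT'
--         elif name.startswith('test'):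
--             category = 'TESTING'
--         elif name in ['up', 'down', 'restart', 'rebuild', 'shell', 'redis-cli', 'health', 'help']:
--             category = 'SYSTEM MANAGEMENT'
--             if name == 'help':
--                 lines[0] = 'help:  # Show all available commands'
--             elif name == 'up':
--                 lines[0] = 'up:  # Start all services'
--             elif name == 'down':
--                 lines[0] = 'down:  # Stop all services'
--             elif name == 'restart':
--                 lines[0] = 'restart: down up  # Restart all services'
--             elif name == 'health':
--                 lines[0] = 'health:  # Check system health'
--             elif name == 'shell':
--                 lines[0] = 'shell:  # Open shell in container'
--             elif name == 'redis-cli':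
--                 lines[0] = 'redis-cli:  # Access Redis CLI'
--             elif name == 'rebuild':
--                 lines[0] = first_line.split(':')[0] + ':  # Rebuild a specific service'
--         else:
--             category = 'UTILITY'
--
--         content = '\n'.join(lines)
--         categories[category].append((name, content))
--
--     # Sort recipes within each category
--     for category in categories:
--         categories[category].sort(key=lambda x: x[0])
--
--     return categories
-- ===== SOURCE B (Python) =====
-- # Different strategy than A: A builds groups first and sorts each group; B annotates
-- # and tags in one comprehension, does ONE global stable sort of all recipes by name,
-- # then slices out each category from the sorted list by filtering (stability makes
-- # each slice already sorted), with category and annotation logic split into helpers.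
--
-- def _category(name):
--     if name.startswith('cert-'):
--         return 'CERTIFICATE MANAGEMENT'
--     if name.startswith('config-'):
--         return 'CONFIGURATION MANAGEMENT'
--     if name.startswith('service-port'):
--         return 'PORT MANAGEMENT'
--     if name.startswith('service-') and any(x in name for x in ['external', 'register', 'unregister', 'update-external', 'list-all']):
--         return 'EXTERNAL SERVICE MANAGEMENT'
--     if name.startswith('service-'):
--         return 'DOCKER SERVICE MANAGEMENT'
--     if name.startswith('logs'):
--         return 'LOGGING AND MONITORING'
--     if name.startswith('oauth-'):
--         return 'OAUTH MANAGEMENT'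
--     if name.startswith('proxy-resource'):
--         return 'PROTECTED RESOURCE MANAGEMENT'
--     if name.startswith('proxy-'):
--         return 'PROXY MANAGEMENT'
--     if name.startswith('route-'):
--         return 'ROUTE MANAGEMENT'
--     if name.startswith('token-'):
--         return 'TOKEN MANAGEMENT'
--     if name.startswith('test'):
--         return 'TESTING'
--     if name in ['up', 'down', 'restart', 'rebuild', 'shell', 'redis-cli', 'health', 'help']:
--         return 'SYSTEM MANAGEMENT'
--     return 'UTILITY'
--
-- # recipes whose first line is replaced wholesale
-- _REPLACE = {
--     'help': 'help:  # Show all available commands',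
--     'up': 'up:  # Start all services',
--     'down': 'down:  # Stop all services',
--     'restart': 'restart: down up  # Restart all services',
--     'health': 'health:  # Check system health',
--     'shell': 'shell:  # Open shell in container',
--     'redis-cli': 'redis-cli:  # Access Redis CLI',
-- }
--
-- # recipes whose first line gets a trailing comment after its head (before the first ':')
-- _COMMENT = {
--     'cert-create': 'Create a new certificate',
--     'cert-delete': 'Delete certificate',
--     'cert-list': 'List certificates (requires authentication)',
--     'cert-show': 'Show certificate details',
--     'config-save': 'Save full configuration to YAML backup',
--     'config-load': 'Load configuration from YAML backup',
--     'rebuild': 'Rebuild a specific service',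
-- }
--
-- def _annotate(name, content):
--     lines = content.split('\n')
--     if name in _REPLACE:
--         lines[0] = _REPLACE[name]
--     elif name in _COMMENT:
--         lines[0] = lines[0].split(':')[0] + ':  # ' + _COMMENT[name]
--     return '\n'.join(lines)
--
-- def categorize_recipes(recipes):
--     """Categorize recipes by their prefix."""
--     tagged = [(name, _category(name), _annotate(name, content)) for name, content in recipes]
--     order = []
--     for _, cat, _ in tagged:
--         if cat not in order:
--             order.append(cat)
--     by_name = sorted(tagged, key=lambda t: t[0])
--     return {cat: [(n, c) for n, k, c in by_name if k == cat] for cat in order}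
-- ===== Notes on version B (the rewrite author's own statement) =====
-- stated objective: alternative
-- what changed: A groups recipes into a defaultdict while walking them and then sorts each category's list separately; B instead annotates and tags every recipe once, performs ONE global stable sort of all recipes by name, and builds each category as a filtered slice of that sorted list (stability makes every slice already sorted), with the category order taken from a separate first-occurrence pass.
import Mathlib
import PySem

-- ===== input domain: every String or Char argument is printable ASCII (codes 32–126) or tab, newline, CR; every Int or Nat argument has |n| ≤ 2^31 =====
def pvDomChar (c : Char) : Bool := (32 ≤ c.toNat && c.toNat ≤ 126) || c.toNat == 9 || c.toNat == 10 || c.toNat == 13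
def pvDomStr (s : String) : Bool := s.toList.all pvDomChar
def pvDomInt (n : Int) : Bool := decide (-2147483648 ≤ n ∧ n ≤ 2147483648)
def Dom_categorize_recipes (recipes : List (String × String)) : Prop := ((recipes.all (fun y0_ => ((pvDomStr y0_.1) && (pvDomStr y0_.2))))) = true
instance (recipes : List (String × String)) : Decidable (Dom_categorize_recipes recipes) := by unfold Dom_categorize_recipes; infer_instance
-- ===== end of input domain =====

-- B replaces A's group-then-sort-each-group strategy by annotate/tag once, ONE global
-- stable sort of all recipes by name, then per-category slices of the sorted list
-- (objective: alternative, same cost; stability makes each slice already sorted).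

-- ===== PORT A =====
-- the body of A's for-loop: the category chain with interleaved lines[0] rewrites,
-- returning (category, (name, rejoined content))
def pvA_entry (name content : String) : String × String × String :=
  let lines := PySem.Chars.splitOn content.toList ['\n']
  let firstLine := lines.headI
  let r : String × List (List Char) :=
    if PySem.Str.startswith name "cert-" then
      ("CERTIFICATE MANAGEMENT",
        if name == "cert-create" then
          ((PySem.Chars.splitOn firstLine [':']).headI ++ ":  # Create a new certificate".toList) :: lines.tail
        else if name == "cert-delete" then
          ((PySem.Chars.splitOn firstLine [':']).headI ++ ":  # Delete certificate".toList) :: lines.tail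
        else if name == "cert-list" then
          ((PySem.Chars.splitOn firstLine [':']).headI ++ ":  # List certificates (requires authentication)".toList) :: lines.tail
        else if name == "cert-show" then
          ((PySem.Chars.splitOn firstLine [':']).headI ++ ":  # Show certificate details".toList) :: lines.tail
        else lines)
    else if PySem.Str.startswith name "config-" then
      ("CONFIGURATION MANAGEMENT",
        if name == "config-save" then
          ((PySem.Chars.splitOn firstLine [':']).headI ++ ":  # Save full configuration to YAML backup".toList) :: lines.tail
        else if name == "config-load" then
          ((PySem.Chars.splitOn firstLine [':']).headI ++ ":  # Load configuration from YAML backup".toList) :: lines.tail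
        else lines)
    else if PySem.Str.startswith name "service-port" then
      ("PORT MANAGEMENT", lines)
    else if PySem.Str.startswith name "service-" &&
            (["external", "register", "unregister", "update-external", "list-all"].any
              (fun x => PySem.Str.isIn x name)) then
      ("EXTERNAL SERVICE MANAGEMENT", lines)
    else if PySem.Str.startswith name "service-" then
      ("DOCKER SERVICE MANAGEMENT", lines)
    else if PySem.Str.startswith name "logs" then
      ("LOGGING AND MONITORING", lines)
    else if PySem.Str.startswith name "oauth-" then
      ("OAUTH MANAGEMENT", lines)
    else if PySem.Str.startswith name "proxy-resource" then
      ("PROTECTED RESOURCE MANAGEMENT", lines)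
    else if PySem.Str.startswith name "proxy-" then
      ("PROXY MANAGEMENT", lines)
    else if PySem.Str.startswith name "route-" then
      ("ROUTE MANAGEMENT", lines)
    else if PySem.Str.startswith name "token-" then
      ("TOKEN MANAGEMENT", lines)
    else if PySem.Str.startswith name "test" then
      ("TESTING", lines)
    else if ["up", "down", "restart", "rebuild", "shell", "redis-cli", "health", "help"].contains name then
      ("SYSTEM MANAGEMENT",
        if name == "help" then "help:  # Show all available commands".toList :: lines.tail
        else if name == "up" then "up:  # Start all services".toList :: lines.tail
        else if name == "down" then "down:  # Stop all services".toList :: lines.tail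
        else if name == "restart" then "restart: down up  # Restart all services".toList :: lines.tail
        else if name == "health" then "health:  # Check system health".toList :: lines.tail
        else if name == "shell" then "shell:  # Open shell in container".toList :: lines.tail
        else if name == "redis-cli" then "redis-cli:  # Access Redis CLI".toList :: lines.tail
        else if name == "rebuild" then
          ((PySem.Chars.splitOn firstLine [':']).headI ++ ":  # Rebuild a specific service".toList) :: lines.tail
        else lines)
    else ("UTILITY", lines)
  (r.1, name, String.ofList (PySem.Chars.join ['\n'] r.2))

def categorize_recipes (recipes : List (String × String)) : List (String × List (String × String)) :=
  let d := recipes.foldl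
    (fun cats p =>
      let e := pvA_entry p.1 p.2
      cats.modify e.1 [] (fun l => l ++ [e.2]))
    PySem.Dict.empty
  d.items.map (fun kv => (kv.1, PySem.List.sorted kv.2 (fun x => x.1) false))

-- ===== PORT B =====
def pvCategory (name : String) : String :=
  if PySem.Str.startswith name "cert-" then "CERTIFICATE MANAGEMENT"
  else if PySem.Str.startswith name "config-" then "CONFIGURATION MANAGEMENT"
  else if PySem.Str.startswith name "service-port" then "PORT MANAGEMENT"
  else if PySem.Str.startswith name "service-" &&
          (["external", "register", "unregister", "update-external", "list-all"].any
            (fun x => PySem.Str.isIn x name)) then "EXTERNAL SERVICE MANAGEMENT"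
  else if PySem.Str.startswith name "service-" then "DOCKER SERVICE MANAGEMENT"
  else if PySem.Str.startswith name "logs" then "LOGGING AND MONITORING"
  else if PySem.Str.startswith name "oauth-" then "OAUTH MANAGEMENT"
  else if PySem.Str.startswith name "proxy-resource" then "PROTECTED RESOURCE MANAGEMENT"
  else if PySem.Str.startswith name "proxy-" then "PROXY MANAGEMENT"
  else if PySem.Str.startswith name "route-" then "ROUTE MANAGEMENT"
  else if PySem.Str.startswith name "token-" then "TOKEN MANAGEMENT"
  else if PySem.Str.startswith name "test" then "TESTING"
  else if ["up", "down", "restart", "rebuild", "shell", "redis-cli", "health", "help"].contains name then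
    "SYSTEM MANAGEMENT"
  else "UTILITY"

-- recipes whose first line is replaced wholesale
def pvReplace : PySem.Dict String String := PySem.Dict.mk
  [ ("help", "help:  # Show all available commands"),
    ("up", "up:  # Start all services"),
    ("down", "down:  # Stop all services"),
    ("restart", "restart: down up  # Restart all services"),
    ("health", "health:  # Check system health"),
    ("shell", "shell:  # Open shell in container"),
    ("redis-cli", "redis-cli:  # Access Redis CLI") ]

-- recipes whose first line gets a trailing comment after its head (before the first ':')
def pvComment : PySem.Dict String String := PySem.Dict.mk
  [ ("cert-create", "Create a new certificate"),
    ("cert-delete", "Delete certificate"),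
    ("cert-list", "List certificates (requires authentication)"),
    ("cert-show", "Show certificate details"),
    ("config-save", "Save full configuration to YAML backup"),
    ("config-load", "Load configuration from YAML backup"),
    ("rebuild", "Rebuild a specific service") ]

def pvAnnotate (name content : String) : String :=
  let lines := PySem.Chars.splitOn content.toList ['\n']
  let lines' :=
    if pvReplace.contains name then (pvReplace.getD name "").toList :: lines.tail
    else if pvComment.contains name then
      ((PySem.Chars.splitOn lines.headI [':']).headI ++ ":  # ".toList ++ (pvComment.getD name "").toList) :: lines.tail
    else lines
  String.ofList (PySem.Chars.join ['\n'] lines')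

def categorize_recipes_alt (recipes : List (String × String)) : List (String × List (String × String)) :=
  let tagged := recipes.map (fun p => (p.1, pvCategory p.1, pvAnnotate p.1 p.2))
  let order := tagged.foldl (fun o t => if o.contains t.2.1 then o else o ++ [t.2.1]) []
  let byName := PySem.List.sorted tagged (fun t => t.1) false
  order.map (fun cat =>
    (cat, (byName.filter (fun t => t.2.1 == cat)).map (fun t => (t.1, t.2.2))))

-- ===== PRECONDITION & SPEC =====
def Spec_categorize_recipes (recipes : List (String × String)) (out : List (String × List (String × String))) : Prop := out = categorize_recipes_alt recipes
instance (recipes : List (String × String)) (out : List (String × List (String × String))) : Decidable (Spec_categorize_recipes recipes out) := by unfold Spec_categorize_recipes; infer_instance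

-- ===== CLAIM =====
def Claim_equal_categorize_recipes : Prop := ∀ (recipes : List (String × String)), Dom_categorize_recipes recipes → Spec_categorize_recipes recipes (categorize_recipes recipes)

-- ===== LEMMAS AND PROOFS =====
-- A's loop body equals B's split helpers
set_option maxHeartbeats 4000000 in
lemma pvEntry_eq (name content : String) :
    pvA_entry name content = (pvCategory name, name, pvAnnotate name content) := by
  by_cases h1 : name = "cert-create"; · subst h1; simp [pvA_entry, pvCategory, pvAnnotate, pvReplace, pvComment, PySem.Chars.startswith, PySem.Dict.contains, PySem.Dict.getD, PySem.Dict.get?]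
  by_cases h2 : name = "cert-delete"; · subst h2; simp [pvA_entry, pvCategory, pvAnnotate, pvReplace, pvComment, PySem.Chars.startswith, PySem.Dict.contains, PySem.Dict.getD, PySem.Dict.get?]
  by_cases h3 : name = "cert-list"; · subst h3; simp [pvA_entry, pvCategory, pvAnnotate, pvReplace, pvComment, PySem.Chars.startswith, PySem.Dict.contains, PySem.Dict.getD, PySem.Dict.get?]
  by_cases h4 : name = "cert-show"; · subst h4; simp [pvA_entry, pvCategory, pvAnnotate, pvReplace, pvComment, PySem.Chars.startswith, PySem.Dict.contains, PySem.Dict.getD, PySem.Dict.get?]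
  by_cases h5 : name = "config-save"; · subst h5; simp [pvA_entry, pvCategory, pvAnnotate, pvReplace, pvComment, PySem.Chars.startswith, PySem.Dict.contains, PySem.Dict.getD, PySem.Dict.get?]
  by_cases h6 : name = "config-load"; · subst h6; simp [pvA_entry, pvCategory, pvAnnotate, pvReplace, pvComment, PySem.Chars.startswith, PySem.Dict.contains, PySem.Dict.getD, PySem.Dict.get?]
  by_cases h7 : name = "help"; · subst h7; simp [pvA_entry, pvCategory, pvAnnotate, pvReplace, PySem.Chars.startswith, PySem.Dict.contains, PySem.Dict.getD, PySem.Dict.get?]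
  by_cases h8 : name = "up"; · subst h8; simp [pvA_entry, pvCategory, pvAnnotate, pvReplace, PySem.Chars.startswith, PySem.Dict.contains, PySem.Dict.getD, PySem.Dict.get?]
  by_cases h9 : name = "down"; · subst h9; simp [pvA_entry, pvCategory, pvAnnotate, pvReplace, PySem.Chars.startswith, PySem.Dict.contains, PySem.Dict.getD, PySem.Dict.get?]
  by_cases h10 : name = "restart"; · subst h10; simp [pvA_entry, pvCategory, pvAnnotate, pvReplace, PySem.Chars.startswith, PySem.Dict.contains, PySem.Dict.getD, PySem.Dict.get?]
  by_cases h11 : name = "health"; · subst h11; simp [pvA_entry, pvCategory, pvAnnotate, pvReplace, PySem.Chars.startswith, PySem.Dict.contains, PySem.Dict.getD, PySem.Dict.get?]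
  by_cases h12 : name = "shell"; · subst h12; simp [pvA_entry, pvCategory, pvAnnotate, pvReplace, PySem.Chars.startswith, PySem.Dict.contains, PySem.Dict.getD, PySem.Dict.get?]
  by_cases h13 : name = "redis-cli"; · subst h13; simp [pvA_entry, pvCategory, pvAnnotate, pvReplace, PySem.Chars.startswith, PySem.Dict.contains, PySem.Dict.getD, PySem.Dict.get?]
  by_cases h14 : name = "rebuild"; · subst h14; simp [pvA_entry, pvCategory, pvAnnotate, pvReplace, pvComment, PySem.Chars.startswith, PySem.Dict.contains, PySem.Dict.getD, PySem.Dict.get?]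
  have hrep : pvReplace.contains name = false := by
    simp only [pvReplace, PySem.Dict.contains]
    simp
    exact ⟨Ne.symm h7, Ne.symm h8, Ne.symm h9, Ne.symm h10, Ne.symm h11, Ne.symm h12, Ne.symm h13⟩
  have hcom : pvComment.contains name = false := by
    simp only [pvComment, PySem.Dict.contains]
    simp
    exact ⟨Ne.symm h1, Ne.symm h2, Ne.symm h3, Ne.symm h4, Ne.symm h5, Ne.symm h6, Ne.symm h14⟩
  have hmem : (["up", "down", "restart", "rebuild", "shell", "redis-cli", "health", "help"]).contains name = false := by
    simp [h7, h8, h9, h10, h11, h12, h13, h14]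
  simp only [pvA_entry, pvCategory, pvAnnotate, hrep, hcom, hmem, beq_iff_eq,
    h1, h2, h3, h4, h5, h6, h7, h8, h9, h10, h11, h12, h13, h14,
    if_false, Bool.false_eq_true]
  cases c1 : PySem.Str.startswith name "cert-" with
  | true => rfl
  | false =>
  cases c2 : PySem.Str.startswith name "config-" with
  | true => rfl
  | false =>
  cases c3 : PySem.Str.startswith name "service-port" with
  | true => rfl
  | false =>
  cases c4 : (PySem.Str.startswith name "service-" && ["external", "register", "unregister", "update-external", "list-all"].any fun x => PySem.Str.isIn x name) with
  | true => rfl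
  | false =>
  cases c5 : PySem.Str.startswith name "service-" with
  | true => rfl
  | false =>
  cases c6 : PySem.Str.startswith name "logs" with
  | true => rfl
  | false =>
  cases c7 : PySem.Str.startswith name "oauth-" with
  | true => rfl
  | false =>
  cases c8 : PySem.Str.startswith name "proxy-resource" with
  | true => rfl
  | false =>
  cases c9 : PySem.Str.startswith name "proxy-" with
  | true => rfl
  | false =>
  cases c10 : PySem.Str.startswith name "route-" with
  | true => rfl
  | false =>
  cases c11 : PySem.Str.startswith name "token-" with
  | true => rfl
  | false =>
  cases c12 : PySem.Str.startswith name "test" with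
  | true => rfl
  | false => rfl

-- B's stable insertion step commutes with a key-preserving map
lemma pv_map_insertBy {α β : Type} (f : α → β) (ka : α → String) (kb : β → String)
    (hk : ∀ a, kb (f a) = ka a) (x : α) (ys : List α) :
    (PySem.List.insertBy (fun a b => decide (ka a < ka b)) x ys).map f
      = PySem.List.insertBy (fun a b => decide (kb a < kb b)) (f x) (ys.map f) := by
  induction ys with
  | nil => simp [PySem.List.insertBy]
  | cons y ys ih =>
    simp only [PySem.List.insertBy, hk, List.map_cons]
    by_cases h : ka x < ka y
    · simp only [h, decide_true, if_true, List.map_cons]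
    · simp only [h, decide_false, Bool.false_eq_true, if_false, List.map_cons, ih]

-- sorting after a key-preserving map is mapping the sorted list
lemma pv_map_sorted {α β : Type} (f : α → β) (ka : α → String) (kb : β → String)
    (hk : ∀ a, kb (f a) = ka a) (l : List α) :
    PySem.List.sorted (l.map f) kb false = (PySem.List.sorted l ka false).map f := by
  rw [PySem.List.sorted_eq_foldl_insertBy, PySem.List.sorted_eq_foldl_insertBy]
  suffices h : ∀ (acc : List α),
      (l.map f).foldl (fun acc x => PySem.List.insertBy (fun a b => decide (kb a < kb b)) x acc) (acc.map f)
        = (l.foldl (fun acc x => PySem.List.insertBy (fun a b => decide (ka a < ka b)) x acc) acc).map f by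
    simpa using h []
  induction l with
  | nil => intro acc; simp
  | cons x l ih =>
    intro acc
    simp only [List.map_cons, List.foldl_cons]
    rw [← pv_map_insertBy f ka kb hk, ih]

-- prepend case of insertBy: x goes first when its key is below the whole list
lemma pv_insertBy_eq_cons {α : Type} (key : α → String) (x : α) (zs : List α)
    (h : ∀ z ∈ zs, key x < key z) :
    PySem.List.insertBy (fun a b => decide (key a < key b)) x zs = x :: zs := by
  cases zs with
  | nil => rfl
  | cons z zs => simp [PySem.List.insertBy, h z (by simp)]

-- insertBy keeps the accumulator sorted
lemma pv_pairwise_insertBy {α : Type} (key : α → String) (x : α) (ys : List α)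
    (h : ys.Pairwise (fun a b => key a ≤ key b)) :
    (PySem.List.insertBy (fun a b => decide (key a < key b)) x ys).Pairwise
      (fun a b => key a ≤ key b) := by
  induction ys with
  | nil => simp [PySem.List.insertBy]
  | cons y ys ih =>
    rcases List.pairwise_cons.mp h with ⟨hy, hys⟩
    simp only [PySem.List.insertBy]
    by_cases hxy : key x < key y
    · simp only [hxy, decide_true, if_true]
      refine List.pairwise_cons.mpr ⟨?_, h⟩
      intro z hz
      rcases List.mem_cons.mp hz with rfl | hz
      · exact le_of_lt hxy
      · exact le_of_lt (lt_of_lt_of_le hxy (hy z hz))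
    · simp only [hxy, decide_false, Bool.false_eq_true, if_false]
      refine List.pairwise_cons.mpr ⟨?_, ih hys⟩
      intro z hz
      rcases (PySem.List.mem_insertBy _ x z ys).mp hz with rfl | hz
      · exact le_of_not_gt hxy
      · exact hy z hz

-- filtering commutes with one stable insertion into a sorted accumulator
lemma pv_filter_insertBy {α : Type} (key : α → String) (p : α → Bool) (x : α) (ys : List α)
    (h : ys.Pairwise (fun a b => key a ≤ key b)) :
    (PySem.List.insertBy (fun a b => decide (key a < key b)) x ys).filter p
      = if p x then PySem.List.insertBy (fun a b => decide (key a < key b)) x (ys.filter p)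
        else ys.filter p := by
  induction ys with
  | nil => by_cases hx : p x <;> simp [PySem.List.insertBy, hx]
  | cons y ys ih =>
    rcases List.pairwise_cons.mp h with ⟨hy, hys⟩
    by_cases hxy : key x < key y
    · have hins : PySem.List.insertBy (fun a b => decide (key a < key b)) x (y :: ys) = x :: y :: ys := by
        simp only [PySem.List.insertBy, hxy, decide_true, if_true]
      rw [hins]
      by_cases hx : p x
      · rw [List.filter_cons_of_pos hx, if_pos hx,
          pv_insertBy_eq_cons key x ((y :: ys).filter p) ?_]
        intro z hz
        rcases List.mem_cons.mp (List.mem_of_mem_filter hz) with rfl | hz'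
        · exact hxy
        · exact lt_of_lt_of_le hxy (hy z hz')
      · rw [List.filter_cons_of_neg hx, if_neg hx]
    · have hins : PySem.List.insertBy (fun a b => decide (key a < key b)) x (y :: ys)
          = y :: PySem.List.insertBy (fun a b => decide (key a < key b)) x ys := by
        simp only [PySem.List.insertBy, hxy, decide_false, Bool.false_eq_true, if_false]
      rw [hins]
      by_cases hpy : p y
      · rw [List.filter_cons_of_pos hpy, List.filter_cons_of_pos hpy, ih hys]
        by_cases hx : p x
        · rw [if_pos hx, if_pos hx]
          have hstep : PySem.List.insertBy (fun a b => decide (key a < key b)) x (y :: ys.filter p)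
              = y :: PySem.List.insertBy (fun a b => decide (key a < key b)) x (ys.filter p) := by
            simp only [PySem.List.insertBy, hxy, decide_false, Bool.false_eq_true, if_false]
          rw [hstep]
        · rw [if_neg hx, if_neg hx]
      · rw [List.filter_cons_of_neg hpy, List.filter_cons_of_neg hpy, ih hys]

-- filtering commutes with the whole stable sort
lemma pv_filter_sorted {α : Type} (key : α → String) (p : α → Bool) (l : List α) :
    (PySem.List.sorted l key false).filter p = PySem.List.sorted (l.filter p) key false := by
  rw [PySem.List.sorted_eq_foldl_insertBy, PySem.List.sorted_eq_foldl_insertBy]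
  suffices h : ∀ (acc : List α), acc.Pairwise (fun a b => key a ≤ key b) →
      (l.foldl (fun acc x => PySem.List.insertBy (fun a b => decide (key a < key b)) x acc) acc).filter p
        = (l.filter p).foldl (fun acc x => PySem.List.insertBy (fun a b => decide (key a < key b)) x acc) (acc.filter p) by
    simpa using h [] (by simp)
  induction l with
  | nil => intro acc _; simp
  | cons x l ih =>
    intro acc hacc
    simp only [List.foldl_cons, List.filter_cons]
    rw [ih _ (pv_pairwise_insertBy key x acc hacc), pv_filter_insertBy key p x acc hacc]
    by_cases hx : p x <;> simp [hx]

-- B's first-occurrence order loop builds the same list as Set.update of the tags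
lemma pv_order (l : List (String × String × String)) :
    l.foldl (fun o t => if o.contains t.2.1 then o else o ++ [t.2.1]) []
      = PySem.Set.update [] (l.map (fun t => t.2.1)) := by
  rw [PySem.Set.update, List.foldl_map]
  rfl

-- grouping-then-sorting the tagged records equals sorting once and slicing per tag
lemma pv_assemble (tagged : List (String × String × String)) :
    ((List.foldl (fun d t => d.modify t.2.1 [] (fun l => l ++ [(t.1, t.2.2)]))
        (PySem.Dict.empty : PySem.Dict String (List (String × String))) tagged).items).map
      (fun kv => (kv.1, PySem.List.sorted kv.2 (fun x => x.1) false))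
    = (tagged.foldl (fun o t => if o.contains t.2.1 then o else o ++ [t.2.1]) []).map
        (fun cat => (cat, ((PySem.List.sorted tagged (fun t => t.1) false).filter
            (fun t => t.2.1 == cat)).map (fun t => (t.1, t.2.2)))) := by
  set d := List.foldl (fun d t => d.modify t.2.1 [] (fun l => l ++ [(t.1, t.2.2)]))
    (PySem.Dict.empty : PySem.Dict String (List (String × String))) tagged with hd
  have hkeys : d.keys = PySem.Set.update [] (tagged.map (fun t => t.2.1)) := by
    rw [hd]
    have := PySem.Dict.keys_foldl_modify_key tagged (fun t => t.2.1) ([] : List (String × String))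
      (fun _ t l => l ++ [(t.1, t.2.2)]) PySem.Dict.empty
    simpa [PySem.Dict.keys_empty] using this
  have hnodup : d.keys.Nodup := by
    rw [hd]
    exact PySem.Dict.nodup_keys_foldl_modify_key tagged (fun t => t.2.1) _
      (fun _ t l => l ++ [(t.1, t.2.2)]) PySem.Dict.empty (by simp [PySem.Dict.keys_empty])
  have hgetD : ∀ c, d.getD c [] = ((tagged.filter (fun t => t.2.1 == c)).map (fun t => (t.1, t.2.2))) := by
    intro c
    rw [hd]
    have := PySem.Dict.getD_foldl_modify_append
      (tagged.map (fun t => (t.2.1, (t.1, t.2.2)))) (PySem.Dict.empty) c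
    rw [List.foldl_map] at this
    simpa [PySem.Dict.getD_empty, List.filter_map, Function.comp] using this
  rw [PySem.Dict.items_eq_map_keys d hnodup [], List.map_map, pv_order, ← hkeys]
  apply List.map_congr_left
  intro c _
  simp only [Function.comp_apply, hgetD c]
  rw [pv_map_sorted (fun t => (t.1, t.2.2)) (fun t => t.1) (fun x => x.1) (fun _ => rfl)
        (tagged.filter (fun t => t.2.1 == c)),
      pv_filter_sorted (fun t => t.1) (fun t => t.2.1 == c) tagged]

-- the two ports agree on every input
theorem pv_main (recipes : List (String × String)) :
    categorize_recipes recipes = categorize_recipes_alt recipes := by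
  have h1 : recipes.foldl
      (fun cats p => cats.modify (pvA_entry p.1 p.2).1 [] (fun l => l ++ [(pvA_entry p.1 p.2).2]))
      (PySem.Dict.empty : PySem.Dict String (List (String × String)))
      = List.foldl (fun d t => d.modify t.2.1 [] (fun l => l ++ [(t.1, t.2.2)])) PySem.Dict.empty
          (recipes.map (fun p => (p.1, pvCategory p.1, pvAnnotate p.1 p.2))) := by
    rw [List.foldl_map]
    congr 1
    funext cats p
    rw [pvEntry_eq]
  simp only [categorize_recipes, categorize_recipes_alt, h1]
  exact pv_assemble (recipes.map (fun p => (p.1, pvCategory p.1, pvAnnotate p.1 p.2)))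

-- ===== VERDICT =====
theorem categorize_recipes_spec : Claim_equal_categorize_recipes := by
  intro recipes _
  exact pv_main recipes
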